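-- pv_equiv track=rewrite | github.com/EmmaSkoglund/Programmering_1_py | Kapitel_6/Uppgift_6.2.py | oversatt_till_rovarspraket
-- ===== SOURCE A (Python) =====
-- def oversatt_till_rovarspraket(text):
--
--     konsonanter = "bcdfghjklmnpqrstvwxyzBCDFGHJKLMNPQRSTVWXYZ"
--     resultat = ''
--     index = 0
--
--     while index < len(text):
--         tecken = text[index]
--         if tecken in konsonanter:
--             resultat += tecken + "o" + tecken
--         else:
--             resultat += tecken
--
--         index += 1
--
--     return resultat
-- ===== SOURCE B (Python) =====
-- def oversatt_till_rovarspraket(text):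
--     # Staged whole-string passes: one replace per consonant. Order is irrelevant
--     # because each pass only inserts 'o' (a vowel) and copies of the consonant
--     # it just expanded, which no later pass touches again.
--     for c in "bcdfghjklmnpqrstvwxyzBCDFGHJKLMNPQRSTVWXYZ":
--         text = text.replace(c, c + "o" + c)
--     return text
-- ===== Notes on version B (the rewrite author's own statement) =====
-- stated objective: faster
-- what changed: Replaces A's single left-to-right character scan with per-character branching and repeated concatenation by 42 staged whole-string replace passes, one per consonant; correct in any pass order because a pass only inserts the vowel 'o' and copies of the consonant it just expanded, which no later pass matches.
import Mathlib
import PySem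

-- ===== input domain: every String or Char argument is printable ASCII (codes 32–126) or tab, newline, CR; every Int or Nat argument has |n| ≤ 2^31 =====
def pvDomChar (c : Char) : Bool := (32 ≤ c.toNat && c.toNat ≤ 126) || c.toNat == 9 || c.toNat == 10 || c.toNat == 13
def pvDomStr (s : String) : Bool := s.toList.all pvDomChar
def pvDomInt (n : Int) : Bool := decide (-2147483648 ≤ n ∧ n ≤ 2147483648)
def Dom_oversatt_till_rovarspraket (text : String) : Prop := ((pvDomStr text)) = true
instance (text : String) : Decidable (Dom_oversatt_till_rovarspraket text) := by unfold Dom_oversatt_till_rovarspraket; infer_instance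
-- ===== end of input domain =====

-- B replaces A's single character scan by 42 staged whole-string replace passes,
-- one per consonant (objective: alternative). Return value only; no mutation.

-- ===== PORT A =====
-- literal port of A: a left fold over the characters carrying the result string,
-- branching on membership in the consonant string, appending char by char
def oversatt_till_rovarspraket (text : String) : String :=
  let konsonanter := "bcdfghjklmnpqrstvwxyzBCDFGHJKLMNPQRSTVWXYZ"
  String.ofList (text.toList.foldl
    (fun resultat tecken =>
      if tecken ∈ konsonanter.toList then resultat ++ [tecken, 'o', tecken]
      else resultat ++ [tecken]) [])

-- ===== PORT B =====
-- port of B: fold over the consonant string, each step one whole-string replace c -> c+"o"+c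
def oversatt_till_rovarspraket_alt (text : String) : String :=
  "bcdfghjklmnpqrstvwxyzBCDFGHJKLMNPQRSTVWXYZ".toList.foldl
    (fun t c => PySem.Str.replace t (String.ofList [c]) (String.ofList [c, 'o', c])) text

-- ===== PRECONDITION & SPEC =====
def Spec_oversatt_till_rovarspraket (text : String) (out : String) : Prop := out = oversatt_till_rovarspraket_alt text
instance (text : String) (out : String) : Decidable (Spec_oversatt_till_rovarspraket text out) := by unfold Spec_oversatt_till_rovarspraket; infer_instance

-- ===== CLAIM (what is proved, stated in full; the proofs are below) =====
def Claim_equal_oversatt_till_rovarspraket : Prop := ∀ (text : String), Dom_oversatt_till_rovarspraket text → Spec_oversatt_till_rovarspraket text (oversatt_till_rovarspraket text)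

-- ===== LEMMAS AND PROOFS =====

-- single-character replace is the per-character expansion (flatMap)
theorem pv_replace_go_single (k : Char) (new : List Char) (l acc : List Char)
    (fuel : Nat) (hf : l.length ≤ fuel) :
    PySem.Chars.replace.go [k] new fuel l acc
      = acc.reverse ++ l.flatMap (fun c => if c = k then new else [c]) := by
  induction l generalizing fuel acc with
  | nil => cases fuel <;> simp [PySem.Chars.replace.go]
  | cons c t ih =>
    cases fuel with
    | zero => simp at hf
    | succ f =>
      simp only [PySem.Chars.replace.go]
      by_cases h : c = k
      · subst h
        simp only [List.isPrefixOf, BEq.rfl, Bool.true_and, if_true, List.length_cons, List.length_nil, List.drop_succ_cons, List.drop_zero]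
        rw [ih _ f (by simpa using Nat.lt_succ_iff.mp (by simpa using hf))]
        simp [List.flatMap_cons]
      · have hb : ([k].isPrefixOf (c :: t)) = false := by
          simp [List.isPrefixOf]; exact fun hk => (h hk.symm).elim
        rw [hb]
        simp only [Bool.false_eq_true, if_false]
        rw [ih _ f (by simpa using Nat.lt_succ_iff.mp (by simpa using hf))]
        simp [List.flatMap_cons, h]

theorem pv_replace_single (k : Char) (new : List Char) (l : List Char) :
    PySem.Chars.replace l [k] new
      = l.flatMap (fun c => if c = k then new else [c]) := by
  rw [PySem.Chars.replace]
  simp only [List.isEmpty_cons, Bool.false_eq_true, if_false]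
  simpa using pv_replace_go_single k new l [] l.length le_rfl

-- folding one replace-pass per consonant over a duplicate-free list not containing 'o'
-- equals the one-shot per-character expansion
theorem pv_fold_replace (ks : List Char) (hnd : ks.Nodup) (ho : 'o' ∉ ks) (l : List Char) :
    ks.foldl (fun t k => PySem.Chars.replace t [k] [k, 'o', k]) l
      = l.flatMap (fun c => if c ∈ ks then [c, 'o', c] else [c]) := by
  induction ks generalizing l with
  | nil => simp
  | cons k ks ih =>
    have hknd : k ∉ ks := (List.nodup_cons.mp hnd).1
    have hnd' : ks.Nodup := (List.nodup_cons.mp hnd).2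
    have ho' : 'o' ∉ ks := fun h => ho (List.mem_cons_of_mem _ h)
    have hko : k ≠ 'o' := fun h => ho (h ▸ List.mem_cons_self)
    rw [List.foldl_cons, pv_replace_single, ih hnd' ho', List.flatMap_assoc]
    apply List.flatMap_congr
    intro c _
    by_cases hck : c = k
    · subst hck
      simp [List.flatMap_cons, hknd, ho']
    · simp only [if_neg hck, List.flatMap_cons, List.flatMap_nil, List.append_nil,
        List.mem_cons]
      by_cases hcks : c ∈ ks <;> simp [hck, hcks]

-- ===== VERDICT (by name: the statement is the Claim_ definition above) =====
theorem oversatt_till_rovarspraket_spec : Claim_equal_oversatt_till_rovarspraket := by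
  intro text _
  unfold Spec_oversatt_till_rovarspraket oversatt_till_rovarspraket oversatt_till_rovarspraket_alt
  dsimp only
  rw [← String.toList_inj]
  have hrepl : ∀ (t : String) (c : Char),
      (PySem.Str.replace t (String.ofList [c]) (String.ofList [c, 'o', c])).toList
        = PySem.Chars.replace t.toList [c] [c, 'o', c] := by
    intro t c; rw [PySem.Str.toList_replace]; simp
  -- move B's fold to the list side
  have hb : ∀ (ks : List Char) (t : String),
      (ks.foldl (fun t c => PySem.Str.replace t (String.ofList [c]) (String.ofList [c, 'o', c])) t).toList
        = ks.foldl (fun l k => PySem.Chars.replace l [k] [k, 'o', k]) t.toList := by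
    intro ks
    induction ks with
    | nil => intro t; simp
    | cons k ks ih =>
      intro t
      rw [List.foldl_cons, List.foldl_cons, ih, hrepl]
  rw [hb, pv_fold_replace _ (by decide) (by decide), String.toList_ofList]
  have hfun : (fun (resultat : List Char) tecken =>
      if tecken ∈ "bcdfghjklmnpqrstvwxyzBCDFGHJKLMNPQRSTVWXYZ".toList
      then resultat ++ [tecken, 'o', tecken] else resultat ++ [tecken])
      = (fun (resultat : List Char) tecken => resultat ++
          (if tecken ∈ "bcdfghjklmnpqrstvwxyzBCDFGHJKLMNPQRSTVWXYZ".toList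
           then [tecken, 'o', tecken] else [tecken])) := by
    funext resultat tecken; split <;> rfl
  rw [hfun, PySem.List.foldl_append_eq_flatMap]
  simp [List.flatMap_def]
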